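-- pv_equiv track=rewrite | github.com/tomatija/Vaja10 | Covid-19.py | korakov_do_vseh
-- ===== SOURCE A (Python) =====
-- def korakov_do_vseh(skupine, prvi):
--     vsi = set()
--     for manj_skup in skupine:
--         for ljudi in manj_skup:
--             vsi.add(ljudi)
--     counter = 0
--     okuzeni = set()
--     temp = set()
--     okuzeni.add(prvi)
--     while okuzeni != vsi:
--         okuzeni = okuzeni.union(temp)
--         temp = set()
--         for skup1 in skupine:
--             for x in okuzeni:
--                 if x in skup1:
--                     for mordaOkuzen in skup1:
--                         if mordaOkuzen not in okuzeni:
--                             temp.add(mordaOkuzen)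
--                     break
--         counter += 1
--         if counter > 10000:
--             return None
--
--     if counter != 0:
--         return counter-1
--     else:
--         return None
-- ===== SOURCE B (Python) =====
-- def korakov_do_vseh(skupine, prvi):
--     # index: person -> list of (group id, group) pairs that contain them, built once
--     clani = {}
--     for gi, skup in enumerate(skupine):
--         for oseba in skup:
--             clani.setdefault(oseba, []).append((gi, skup))
--     vsi = set(clani)
--     okuzeni = {prvi}
--     koraki = 0
--     while okuzeni != vsi:
--         obdelane = set()
--         novi = set()
--         for x in okuzeni:
--             for gi, skup in clani.get(x, ()):
--                 if gi not in obdelane: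
--                     obdelane.add(gi)
--                     novi.update(skup)
--         novi -= okuzeni
--         if not novi:
--             return None          # the rest can never be infected (A gives up at its cap)
--         okuzeni |= novi
--         koraki += 1
--         if koraki > 9999:
--             return None          # A's give-up threshold, kept
--     return koraki if koraki != 0 else None
-- ===== Notes on version B (the rewrite author's own statement) =====
-- stated objective: faster
-- what changed: Instead of rescanning every group against the whole infected set each round, B builds a person-to-groups index once and each round expands the infection only through that index, with a processed-groups set so no group's members are merged twice in a round.
import Mathlib
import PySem

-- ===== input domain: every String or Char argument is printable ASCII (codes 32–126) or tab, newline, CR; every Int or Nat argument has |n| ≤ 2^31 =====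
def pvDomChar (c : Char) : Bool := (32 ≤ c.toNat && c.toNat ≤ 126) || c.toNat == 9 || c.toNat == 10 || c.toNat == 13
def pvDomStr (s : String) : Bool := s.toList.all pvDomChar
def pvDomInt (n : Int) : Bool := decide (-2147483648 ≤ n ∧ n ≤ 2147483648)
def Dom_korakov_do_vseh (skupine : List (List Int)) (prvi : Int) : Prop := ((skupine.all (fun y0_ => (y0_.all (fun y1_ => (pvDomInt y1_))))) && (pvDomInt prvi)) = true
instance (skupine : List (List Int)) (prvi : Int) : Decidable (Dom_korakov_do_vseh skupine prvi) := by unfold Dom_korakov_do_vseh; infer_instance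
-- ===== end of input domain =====

-- B replaces A's per-round rescan of every group against the whole infected set by a
-- person→groups index built once plus a per-round processed-groups set (objective: faster).

-- ===== PORT A =====

-- 'for manj_skup in skupine: for ljudi in manj_skup: vsi.add(ljudi)'
def pvVsiA (skupine : List (List Int)) : PySem.Set Int :=
  skupine.foldl (fun vsi g => g.foldl (fun s x => PySem.Set.add s x) vsi) PySem.Set.empty

-- one round of A's spreading: 'for skup1 in skupine: for x in okuzeni: if x in skup1:
-- (for mordaOkuzen in skup1: if mordaOkuzen not in okuzeni: temp.add(mordaOkuzen)); break'
-- (the search-with-break over okuzeni is 'okuzeni.any'; the set temp built here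
-- does not depend on Python's set-iteration order)
def pvTempA (skupine : List (List Int)) (okuzeni : PySem.Set Int) : PySem.Set Int :=
  skupine.foldl (fun temp skup1 =>
    if okuzeni.any (fun x => skup1.contains x) then
      skup1.foldl (fun t m => if okuzeni.contains m then t else PySem.Set.add t m) temp
    else temp) PySem.Set.empty

-- A's while loop; the fuel 10001 is never exhausted: the 'counter > 10000' guard returns first
def pvLoopA (skupine : List (List Int)) (vsi : PySem.Set Int) :
    Nat → PySem.Set Int → PySem.Set Int → Int → Option Int
  | 0, _, _, _ => none
  | fuel+1, okuzeni, temp, counter =>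
      if PySem.Set.equal okuzeni vsi then
        -- the code after the while loop
        if counter ≠ 0 then some (counter - 1) else none
      else
        let okuzeni' := PySem.Set.union okuzeni temp
        let temp' := pvTempA skupine okuzeni'
        let counter' := counter + 1
        if counter' > 10000 then none
        else pvLoopA skupine vsi fuel okuzeni' temp' counter'

def korakov_do_vseh (skupine : List (List Int)) (prvi : Int) : Option Int :=
  pvLoopA skupine (pvVsiA skupine) 10001 (PySem.Set.add PySem.Set.empty prvi) PySem.Set.empty 0

-- ===== PORT B =====

-- 'for gi, skup in enumerate(skupine): for oseba in skup: clani.setdefault(oseba, []).append((gi, skup))'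
def pvClani (skupine : List (List Int)) : PySem.Dict Int (List (Int × List Int)) :=
  (PySem.List.enumerate skupine).foldl (fun d q =>
    q.2.foldl (fun d oseba => d.modify oseba [] (fun l => l ++ [q])) d) PySem.Dict.empty

-- one round of B: 'obdelane = set(); novi = set(); for x in okuzeni: for gi, skup in
-- clani.get(x, ()): if gi not in obdelane: obdelane.add(gi); novi.update(skup); novi -= okuzeni'
-- (the sets built here do not depend on Python's set-iteration order)
def pvNoviB (clani : PySem.Dict Int (List (Int × List Int))) (okuzeni : PySem.Set Int) :
    PySem.Set Int :=
  let st := okuzeni.foldl (fun (st : PySem.Set Int × PySem.Set Int) x =>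
      (clani.getD x []).foldl (fun st q =>
        if st.1.contains q.1 then st
        else (PySem.Set.add st.1 q.1, PySem.Set.update st.2 q.2)) st)
    (PySem.Set.empty, PySem.Set.empty)
  PySem.Set.diff st.2 okuzeni

-- B's while loop; the fuel 10001 is never exhausted: the 'koraki > 9999' guard returns first
def pvLoopB (clani : PySem.Dict Int (List (Int × List Int))) (vsi : PySem.Set Int) :
    Nat → PySem.Set Int → Int → Option Int
  | 0, _, _ => none
  | fuel+1, okuzeni, koraki =>
      if PySem.Set.equal okuzeni vsi then
        -- 'return koraki if koraki != 0 else None'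
        if koraki ≠ 0 then some koraki else none
      else
        let novi := pvNoviB clani okuzeni
        if novi.isEmpty then none
        else
          let okuzeni' := PySem.Set.update okuzeni novi
          let koraki' := koraki + 1
          if koraki' > 9999 then none
          else pvLoopB clani vsi fuel okuzeni' koraki'

def korakov_do_vseh_alt (skupine : List (List Int)) (prvi : Int) : Option Int :=
  let clani := pvClani skupine
  pvLoopB clani (PySem.Dict.keys clani) 10001 (PySem.Set.add PySem.Set.empty prvi) 0

-- ===== PRECONDITION & SPEC =====
def Spec_korakov_do_vseh (skupine : List (List Int)) (prvi : Int) (out : Option Int) : Prop := out = korakov_do_vseh_alt skupine prvi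
instance (skupine : List (List Int)) (prvi : Int) (out : Option Int) : Decidable (Spec_korakov_do_vseh skupine prvi out) := by unfold Spec_korakov_do_vseh; infer_instance

-- ===== CLAIM (what is proved, stated in full; the proofs are below) =====
def Claim_equal_korakov_do_vseh : Prop := ∀ (skupine : List (List Int)) (prvi : Int), Dom_korakov_do_vseh skupine prvi → Spec_korakov_do_vseh skupine prvi (korakov_do_vseh skupine prvi)

-- ===== LEMMAS AND PROOFS =====

-- the set of people one spreading round adds, as a proposition on members
def pvNew (skupine : List (List Int)) (ok : List Int) (y : Int) : Prop :=
  ∃ g ∈ skupine, (∃ x ∈ ok, x ∈ g) ∧ y ∈ g ∧ y ∉ ok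

lemma pv_inner_add (g : List Int) :
    ∀ (s : PySem.Set Int) (y : Int),
      y ∈ g.foldl (fun s x => PySem.Set.add s x) s ↔ y ∈ s ∨ y ∈ g := by
  induction g with
  | nil => intro s y; simp
  | cons a g ih =>
      intro s y
      simp only [List.foldl_cons, ih, PySem.Set.mem_add, List.mem_cons]
      tauto

lemma pv_mem_vsiA' (skupine : List (List Int)) :
    ∀ (acc : PySem.Set Int) (y : Int),
      y ∈ skupine.foldl (fun vsi g => g.foldl (fun s x => PySem.Set.add s x) vsi) acc ↔
        y ∈ acc ∨ ∃ g ∈ skupine, y ∈ g := by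
  induction skupine with
  | nil => intro acc y; simp
  | cons g l ih =>
      intro acc y
      simp only [List.foldl_cons, ih, pv_inner_add, List.mem_cons]
      constructor
      · rintro (( h | h) | ⟨g', hg', hy⟩)
        · exact Or.inl h
        · exact Or.inr ⟨g, Or.inl rfl, h⟩
        · exact Or.inr ⟨g', Or.inr hg', hy⟩
      · rintro (h | ⟨g', (rfl | hg'), hy⟩)
        · exact Or.inl (Or.inl h)
        · exact Or.inl (Or.inr hy)
        · exact Or.inr ⟨g', hg', hy⟩

lemma pv_inner_tempA (g : List Int) (ok : PySem.Set Int) :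
    ∀ (t : PySem.Set Int) (y : Int),
      y ∈ g.foldl (fun t m => if ok.contains m then t else PySem.Set.add t m) t ↔
        y ∈ t ∨ (y ∈ g ∧ y ∉ ok) := by
  induction g with
  | nil => intro t y; simp
  | cons a g ih =>
      intro t y
      simp only [List.foldl_cons]
      by_cases ha : a ∈ ok
      · rw [if_pos ((PySem.Set.contains_iff ok a).mpr ha), ih]
        simp only [List.mem_cons]
        constructor
        · rintro (h | ⟨hy, hn⟩)
          · exact Or.inl h
          · exact Or.inr ⟨Or.inr hy, hn⟩
        · rintro (h | ⟨(rfl | hy), hn⟩)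
          · exact Or.inl h
          · exact absurd ha hn
          · exact Or.inr ⟨hy, hn⟩
      · rw [if_neg (by simpa [PySem.Set.contains_iff] using ha), ih]
        simp only [PySem.Set.mem_add, List.mem_cons]
        constructor
        · rintro ((h | rfl) | ⟨hy, hn⟩)
          · exact Or.inl h
          · exact Or.inr ⟨Or.inl rfl, ha⟩
          · exact Or.inr ⟨Or.inr hy, hn⟩
        · rintro (h | ⟨(rfl | hy), hn⟩)
          · exact Or.inl (Or.inl h)
          · exact Or.inl (Or.inr rfl)
          · exact Or.inr ⟨hy, hn⟩

lemma pv_outer_tempA (skupine : List (List Int)) (ok : PySem.Set Int) :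
    ∀ (t : PySem.Set Int) (y : Int),
      y ∈ skupine.foldl (fun temp skup1 =>
          if ok.any (fun x => skup1.contains x) then
            skup1.foldl (fun t m => if ok.contains m then t else PySem.Set.add t m) temp
          else temp) t ↔ y ∈ t ∨ pvNew skupine ok y := by
  induction skupine with
  | nil => intro t y; simp [pvNew]
  | cons g l ih =>
      intro t y
      simp only [List.foldl_cons]
      by_cases hg : ∃ x ∈ ok, x ∈ g
      · rw [if_pos (by simp only [List.any_eq_true, List.contains_iff_mem]; exact hg), ih,
          pv_inner_tempA]
        simp only [pvNew, List.mem_cons]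
        constructor
        · rintro ((h | ⟨hy, hn⟩) | ⟨g', hg', hx, hy, hn⟩)
          · exact Or.inl h
          · exact Or.inr ⟨g, Or.inl rfl, hg, hy, hn⟩
          · exact Or.inr ⟨g', Or.inr hg', hx, hy, hn⟩
        · rintro (h | ⟨g', (rfl | hg'), hx, hy, hn⟩)
          · exact Or.inl (Or.inl h)
          · exact Or.inl (Or.inr ⟨hy, hn⟩)
          · exact Or.inr ⟨g', hg', hx, hy, hn⟩
      · rw [if_neg (by simp only [List.any_eq_true, List.contains_iff_mem]; exact hg), ih]
        simp only [pvNew, List.mem_cons]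
        constructor
        · rintro (h | ⟨g', hg', hx, hy, hn⟩)
          · exact Or.inl h
          · exact Or.inr ⟨g', Or.inr hg', hx, hy, hn⟩
        · rintro (h | ⟨g', (rfl | hg'), hx, hy, hn⟩)
          · exact Or.inl h
          · exact absurd hx hg
          · exact Or.inr ⟨g', hg', hx, hy, hn⟩

lemma pv_modify_group (q : Int × List Int) (l : List Int) :
    ∀ (d : PySem.Dict Int (List (Int × List Int))) (x : Int) (r : Int × List Int),
      r ∈ (l.foldl (fun d o => d.modify o [] (fun v => v ++ [q])) d).getD x [] ↔
        r ∈ d.getD x [] ∨ (r = q ∧ x ∈ l) := by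
  induction l with
  | nil => intro d x r; simp
  | cons o l ih =>
      intro d x r
      simp only [List.foldl_cons, ih, PySem.Dict.getD_modify, List.mem_cons]
      by_cases hx : x = o
      · subst hx
        simp only [if_true, List.mem_append, List.mem_singleton]
        tauto
      · rw [if_neg hx]
        tauto

lemma pv_clani_fold (L : List (Int × List Int)) :
    ∀ (d : PySem.Dict Int (List (Int × List Int))) (x : Int) (r : Int × List Int),
      r ∈ (L.foldl (fun d q => q.2.foldl (fun d o => d.modify o [] (fun v => v ++ [q])) d) d).getD x [] ↔
        r ∈ d.getD x [] ∨ (r ∈ L ∧ x ∈ r.2) := by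
  induction L with
  | nil => intro d x r; simp
  | cons q L ih =>
      intro d x r
      simp only [List.foldl_cons, ih, pv_modify_group, List.mem_cons]
      constructor
      · rintro ((h | ⟨rfl, hx⟩) | ⟨hL, hx⟩)
        · exact Or.inl h
        · exact Or.inr ⟨Or.inl rfl, hx⟩
        · exact Or.inr ⟨Or.inr hL, hx⟩
      · rintro (h | ⟨(rfl | hL), hx⟩)
        · exact Or.inl (Or.inl h)
        · exact Or.inl (Or.inr ⟨rfl, hx⟩)
        · exact Or.inr ⟨hL, hx⟩

lemma pv_mem_clani (skupine : List (List Int)) (x : Int) (q : Int × List Int) :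
    q ∈ (pvClani skupine).getD x [] ↔ q ∈ PySem.List.enumerate skupine ∧ x ∈ q.2 := by
  unfold pvClani
  rw [pv_clani_fold]
  simp [PySem.Dict.getD_empty]

lemma pv_keys_clani_fold (L : List (Int × List Int)) :
    ∀ (d : PySem.Dict Int (List (Int × List Int))) (x : Int),
      x ∈ (L.foldl (fun d q => q.2.foldl (fun d o => d.modify o [] (fun v => v ++ [q])) d) d).keys ↔
        x ∈ d.keys ∨ ∃ q ∈ L, x ∈ q.2 := by
  induction L with
  | nil => intro d x; simp
  | cons q L ih =>
      intro d x
      simp only [List.foldl_cons, ih]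
      rw [PySem.Dict.keys_foldl_modify q.2 ([] : List (Int × List Int)) (fun _ _ v => v ++ [q]) d]
      simp only [PySem.Set.mem_update, List.mem_cons]
      constructor
      · rintro ((h | h) | ⟨q', hq', hx⟩)
        · exact Or.inl h
        · exact Or.inr ⟨q, Or.inl rfl, h⟩
        · exact Or.inr ⟨q', Or.inr hq', hx⟩
      · rintro (h | ⟨q', (rfl | hq'), hx⟩)
        · exact Or.inl (Or.inl h)
        · exact Or.inl (Or.inr hx)
        · exact Or.inr ⟨q', hq', hx⟩

lemma pv_snd_enum (skupine : List (List Int)) (φ : List Int → Prop) :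
    (∃ q ∈ PySem.List.enumerate skupine, φ q.2) ↔ ∃ g ∈ skupine, φ g := by
  constructor
  · rintro ⟨q, hq, h⟩
    refine ⟨q.2, ?_, h⟩
    have := PySem.List.map_snd_enumerate skupine 0
    rw [← this]
    exact List.mem_map_of_mem hq
  · rintro ⟨g, hg, h⟩
    have := PySem.List.map_snd_enumerate skupine 0
    rw [← this] at hg
    obtain ⟨q, hq, rfl⟩ := List.mem_map.mp hg
    exact ⟨q, hq, h⟩

lemma pv_mem_keys_clani (skupine : List (List Int)) (x : Int) :
    x ∈ PySem.Dict.keys (pvClani skupine) ↔ ∃ g ∈ skupine, x ∈ g := by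
  unfold pvClani
  rw [pv_keys_clani_fold]
  simp only [PySem.Dict.keys_empty]
  rw [show (∃ q ∈ PySem.List.enumerate skupine, x ∈ q.2) ↔ ∃ g ∈ skupine, x ∈ g from
    pv_snd_enum skupine (fun g => x ∈ g)]
  simp

lemma pv_enum_inj (skupine : List (List Int)) :
    ∀ p ∈ PySem.List.enumerate skupine, ∀ q ∈ PySem.List.enumerate skupine,
      p.1 = q.1 → p = q := by
  have hnd : ((PySem.List.enumerate skupine).map (fun r => r.1)).Nodup := by
    rw [PySem.List.map_fst_enumerate]
    exact PySem.List.nodup_pyRange_one 0 (0 + skupine.length)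
  intro p hp q hq h
  exact List.inj_on_of_nodup_map hnd hp hq h

lemma pv_pairs_fold (P : List (Int × List Int))
    (hfun : ∀ p ∈ P, ∀ q ∈ P, p.1 = q.1 → p = q) :
    ∀ (L : List (Int × List Int)), (∀ q ∈ L, q ∈ P) →
    ∀ (st : PySem.Set Int × PySem.Set Int),
      (∀ y : Int, y ∈ st.2 ↔ ∃ p ∈ P, p.1 ∈ st.1 ∧ y ∈ p.2) →
      (∀ y : Int, y ∈ (L.foldl (fun st q =>
          if st.1.contains q.1 then st
          else (PySem.Set.add st.1 q.1, PySem.Set.update st.2 q.2)) st).2 ↔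
        ∃ p ∈ P, p.1 ∈ (L.foldl (fun st q =>
          if st.1.contains q.1 then st
          else (PySem.Set.add st.1 q.1, PySem.Set.update st.2 q.2)) st).1 ∧ y ∈ p.2) ∧
      (∀ gi : Int, gi ∈ (L.foldl (fun st q =>
          if st.1.contains q.1 then st
          else (PySem.Set.add st.1 q.1, PySem.Set.update st.2 q.2)) st).1 ↔
        gi ∈ st.1 ∨ ∃ q ∈ L, q.1 = gi) := by
  intro L
  induction L with
  | nil =>
      intro _ st hst
      refine ⟨hst, fun gi => ?_⟩
      simp
  | cons q L ih =>
      intro hL st hst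
      simp only [List.foldl_cons]
      by_cases hc : q.1 ∈ st.1
      · rw [if_pos ((PySem.Set.contains_iff st.1 q.1).mpr hc)]
        obtain ⟨h2, h1⟩ := ih (fun r hr => hL r (List.mem_cons_of_mem q hr)) st hst
        refine ⟨h2, fun gi => ?_⟩
        rw [h1]
        simp only [List.mem_cons]
        constructor
        · rintro (h | ⟨q', hq', rfl⟩)
          · exact Or.inl h
          · exact Or.inr ⟨q', Or.inr hq', rfl⟩
        · rintro (h | ⟨q', (rfl | hq'), rfl⟩)
          · exact Or.inl h
          · exact Or.inl hc
          · exact Or.inr ⟨q', hq', rfl⟩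
      · rw [if_neg (by simpa [PySem.Set.contains_iff] using hc)]
        have hqP : q ∈ P := hL q (List.mem_cons_self)
        have hst' : ∀ y : Int, y ∈ (PySem.Set.add st.1 q.1, PySem.Set.update st.2 q.2).2 ↔
            ∃ p ∈ P, p.1 ∈ (PySem.Set.add st.1 q.1, PySem.Set.update st.2 q.2).1 ∧ y ∈ p.2 := by
          intro y
          simp only [PySem.Set.mem_update, PySem.Set.mem_add, hst]
          constructor
          · rintro (⟨p, hp, h1, h2⟩ | hy)
            · exact ⟨p, hp, Or.inl h1, h2⟩
            · exact ⟨q, hqP, Or.inr rfl, hy⟩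
          · rintro ⟨p, hp, (h1 | h1), h2⟩
            · exact Or.inl ⟨p, hp, h1, h2⟩
            · have : p = q := hfun p hp q hqP h1
              subst this
              exact Or.inr h2
        obtain ⟨h2, h1⟩ := ih (fun r hr => hL r (List.mem_cons_of_mem q hr)) _ hst'
        refine ⟨h2, fun gi => ?_⟩
        rw [h1]
        simp only [PySem.Set.mem_add, List.mem_cons]
        constructor
        · rintro ((h | rfl) | ⟨q', hq', rfl⟩)
          · exact Or.inl h
          · exact Or.inr ⟨q, Or.inl rfl, rfl⟩
          · exact Or.inr ⟨q', Or.inr hq', rfl⟩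
        · rintro (h | ⟨q', (rfl | hq'), rfl⟩)
          · exact Or.inl (Or.inl h)
          · exact Or.inl (Or.inr rfl)
          · exact Or.inr ⟨q', hq', rfl⟩

lemma pv_persons_fold (skupine : List (List Int)) :
    ∀ (M : List Int) (st : PySem.Set Int × PySem.Set Int),
      (∀ y : Int, y ∈ st.2 ↔ ∃ p ∈ PySem.List.enumerate skupine, p.1 ∈ st.1 ∧ y ∈ p.2) →
      (∀ y : Int, y ∈ (M.foldl (fun st x =>
          ((pvClani skupine).getD x []).foldl (fun st q =>
            if st.1.contains q.1 then st
            else (PySem.Set.add st.1 q.1, PySem.Set.update st.2 q.2)) st) st).2 ↔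
        ∃ p ∈ PySem.List.enumerate skupine, p.1 ∈ (M.foldl (fun st x =>
          ((pvClani skupine).getD x []).foldl (fun st q =>
            if st.1.contains q.1 then st
            else (PySem.Set.add st.1 q.1, PySem.Set.update st.2 q.2)) st) st).1 ∧ y ∈ p.2) ∧
      (∀ gi : Int, gi ∈ (M.foldl (fun st x =>
          ((pvClani skupine).getD x []).foldl (fun st q =>
            if st.1.contains q.1 then st
            else (PySem.Set.add st.1 q.1, PySem.Set.update st.2 q.2)) st) st).1 ↔
        gi ∈ st.1 ∨ ∃ x ∈ M, ∃ q ∈ (pvClani skupine).getD x [], q.1 = gi) := by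
  intro M
  induction M with
  | nil =>
      intro st hst
      refine ⟨hst, fun gi => ?_⟩
      simp
  | cons x M ih =>
      intro st hst
      simp only [List.foldl_cons]
      obtain ⟨h2, h1⟩ := pv_pairs_fold (PySem.List.enumerate skupine) (pv_enum_inj skupine)
        ((pvClani skupine).getD x []) (fun q hq => ((pv_mem_clani skupine x q).mp hq).1) st hst
      obtain ⟨g2, g1⟩ := ih _ h2
      refine ⟨g2, fun gi => ?_⟩
      rw [g1, h1]
      simp only [List.mem_cons]
      constructor
      · rintro ((h | ⟨q, hq, rfl⟩) | ⟨x', hx', q, hq, rfl⟩)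
        · exact Or.inl h
        · exact Or.inr ⟨x, Or.inl rfl, q, hq, rfl⟩
        · exact Or.inr ⟨x', Or.inr hx', q, hq, rfl⟩
      · rintro (h | ⟨x', (rfl | hx'), q, hq, rfl⟩)
        · exact Or.inl (Or.inl h)
        · exact Or.inl (Or.inr ⟨q, hq, rfl⟩)
        · exact Or.inr ⟨x', hx', q, hq, rfl⟩

lemma pv_mem_noviB (skupine : List (List Int)) (ok : PySem.Set Int) (y : Int) :
    y ∈ pvNoviB (pvClani skupine) ok ↔ pvNew skupine ok y := by
  unfold pvNoviB
  simp only [PySem.Set.mem_diff]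
  obtain ⟨h2, h1⟩ := pv_persons_fold skupine ok (PySem.Set.empty, PySem.Set.empty)
    (by intro y; simp [PySem.Set.empty])
  rw [h2 y]
  unfold pvNew
  constructor
  · rintro ⟨⟨p, hp, hp1, hyp⟩, hy⟩
    rw [h1] at hp1
    rcases hp1 with h | ⟨x, hx, q, hq, hq1⟩
    · simp [PySem.Set.empty] at h
    · obtain ⟨hqe, hxq⟩ := (pv_mem_clani skupine x q).mp hq
      have : q = p := pv_enum_inj skupine q hqe p hp hq1
      subst this
      refine ((pv_snd_enum skupine (fun g => (∃ x ∈ ok, x ∈ g) ∧ y ∈ g ∧ y ∉ ok)).mp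
        ⟨q, hqe, ⟨x, hx, hxq⟩, hyp, hy⟩)
  · rintro ⟨g, hg, ⟨x, hx, hxg⟩, hyg, hy⟩
    obtain ⟨p, hp, hpg⟩ := (pv_snd_enum skupine (fun g' => g' = g)).mpr ⟨g, hg, rfl⟩
    subst hpg
    refine ⟨⟨p, hp, ?_, hyg⟩, hy⟩
    rw [h1]
    exact Or.inr ⟨x, hx, p, (pv_mem_clani skupine x p).mpr ⟨hp, hxg⟩, rfl⟩

lemma pv_mem_vsiA (skupine : List (List Int)) (y : Int) :
    y ∈ pvVsiA skupine ↔ ∃ g ∈ skupine, y ∈ g := by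
  unfold pvVsiA
  rw [pv_mem_vsiA' skupine PySem.Set.empty y]
  simp [PySem.Set.empty]

lemma pv_mem_tempA (skupine : List (List Int)) (ok : PySem.Set Int) (y : Int) :
    y ∈ pvTempA skupine ok ↔ pvNew skupine ok y := by
  unfold pvTempA
  rw [pv_outer_tempA skupine ok PySem.Set.empty y]
  simp [PySem.Set.empty]

-- pvNew only depends on the members of ok
lemma pv_new_congr (skupine : List (List Int)) (ok ok' : List Int)
    (h : ∀ z : Int, z ∈ ok ↔ z ∈ ok') (y : Int) :
    pvNew skupine ok y ↔ pvNew skupine ok' y := by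
  unfold pvNew
  constructor
  · rintro ⟨g, hg, ⟨x, hx, hxg⟩, hyg, hyo⟩
    exact ⟨g, hg, ⟨x, (h x).mp hx, hxg⟩, hyg, fun c => hyo ((h y).mpr c)⟩
  · rintro ⟨g, hg, ⟨x, hx, hxg⟩, hyg, hyo⟩
    exact ⟨g, hg, ⟨x, (h x).mpr hx, hxg⟩, hyg, fun c => hyo ((h y).mp c)⟩

-- Set.equal only depends on members
lemma pv_equal_congr (s s' t t' : PySem.Set Int)
    (hs : ∀ y : Int, y ∈ s ↔ y ∈ s') (ht : ∀ y : Int, y ∈ t ↔ y ∈ t') :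
    PySem.Set.equal s t = PySem.Set.equal s' t' := by
  rw [Bool.eq_iff_iff, PySem.Set.equal_iff, PySem.Set.equal_iff]
  constructor <;> intro h y
  · rw [← hs, ← ht]; exact h y
  · rw [hs, ht]; exact h y

-- A's vsi and B's index keys have the same members
lemma pv_vsi_keys (skupine : List (List Int)) (y : Int) :
    y ∈ pvVsiA skupine ↔ y ∈ PySem.Dict.keys (pvClani skupine) := by
  rw [pv_mem_vsiA, pv_mem_keys_clani]

lemma pvLoopA_succ (skupine : List (List Int)) (vsi : PySem.Set Int) (fuel : Nat)
    (okuzeni temp : PySem.Set Int) (counter : Int) :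
    pvLoopA skupine vsi (fuel+1) okuzeni temp counter =
      if PySem.Set.equal okuzeni vsi then
        if counter ≠ 0 then some (counter - 1) else none
      else
        if counter + 1 > 10000 then none
        else pvLoopA skupine vsi fuel (PySem.Set.union okuzeni temp)
          (pvTempA skupine (PySem.Set.union okuzeni temp)) (counter + 1) := rfl

lemma pvLoopB_succ (clani : PySem.Dict Int (List (Int × List Int))) (vsi : PySem.Set Int)
    (fuel : Nat) (okuzeni : PySem.Set Int) (koraki : Int) :
    pvLoopB clani vsi (fuel+1) okuzeni koraki =
      if PySem.Set.equal okuzeni vsi then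
        if koraki ≠ 0 then some koraki else none
      else
        if (pvNoviB clani okuzeni).isEmpty then none
        else
          if koraki + 1 > 9999 then none
          else pvLoopB clani vsi fuel (PySem.Set.update okuzeni (pvNoviB clani okuzeni))
            (koraki + 1) := rfl

lemma pv_stallA (skupine : List (List Int)) (vsi : PySem.Set Int) :
    ∀ (fuel : Nat) (ok temp : PySem.Set Int) (c : Int),
      ¬ (∀ y : Int, y ∈ ok ↔ y ∈ vsi) →
      (∀ y : Int, ¬ pvNew skupine ok y) →
      (∀ y : Int, y ∈ temp → y ∈ ok) →
      pvLoopA skupine vsi fuel ok temp c = none := by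
  intro fuel
  induction fuel with
  | zero => intro ok temp c _ _ _; rfl
  | succ fuel ih =>
      intro ok temp c hne hnew hsub
      rw [pvLoopA_succ]
      rw [if_neg (by rw [PySem.Set.equal_iff]; exact hne)]
      have hok' : ∀ y : Int, y ∈ PySem.Set.union ok temp ↔ y ∈ ok := by
        intro y
        rw [PySem.Set.mem_union]
        exact ⟨fun h => h.elim id (hsub y), Or.inl⟩
      split
      · rfl
      · exact ih _ _ _
          (fun h => hne (fun y => (hok' y).symm.trans (h y)))
          (fun y hy => hnew y ((pv_new_congr skupine _ _ hok' y).mp hy))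
          (fun y hy => by
            rw [pv_mem_tempA] at hy
            exact absurd ((pv_new_congr skupine _ _ hok' y).mp hy) (hnew y))

lemma pv_bisim (skupine : List (List Int)) :
    ∀ (n : Nat) (okA temp okB : PySem.Set Int) (c st : Int),
      n ≤ 9999 → c = st + 1 → st = 9999 - (n : Int) →
      (∀ y : Int, y ∈ okA ↔ y ∈ okB) →
      (∀ y : Int, y ∈ temp ↔ pvNew skupine okA y) →
      (st = 0 → ¬ (∀ y : Int, y ∈ okB ↔ y ∈ PySem.Dict.keys (pvClani skupine))) →
      pvLoopA skupine (pvVsiA skupine) (n+1) okA temp c =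
        pvLoopB (pvClani skupine) (PySem.Dict.keys (pvClani skupine)) (n+2) okB st := by
  intro n
  induction n with
  | zero =>
      intro okA temp okB c st hn hc hst hOk hTemp h0
      have hst0 : st = 9999 := by simpa using hst
      rw [pvLoopA_succ, show (0:Nat)+2 = 1+1 from rfl, pvLoopB_succ]
      have heq : PySem.Set.equal okA (pvVsiA skupine) =
          PySem.Set.equal okB (PySem.Dict.keys (pvClani skupine)) :=
        pv_equal_congr _ _ _ _ hOk (pv_vsi_keys skupine)
      rw [← heq]
      by_cases h : PySem.Set.equal okA (pvVsiA skupine)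
      · rw [if_pos h, if_pos h, if_pos (by omega : c ≠ 0), if_pos (by omega : st ≠ 0)]
        congr 1
        omega
      · rw [if_neg h, if_neg h, if_pos (by omega : c + 1 > 10000)]
        split
        · rfl
        · rw [if_pos (by omega : st + 1 > 9999)]
  | succ n ih =>
      intro okA temp okB c st hn hc hst hOk hTemp h0
      have hstv : st = 9998 - (n : Int) := by push_cast at hst ⊢; omega
      rw [pvLoopA_succ, show n+1+2 = (n+2)+1 from rfl, pvLoopB_succ]
      have heq : PySem.Set.equal okA (pvVsiA skupine) =
          PySem.Set.equal okB (PySem.Dict.keys (pvClani skupine)) :=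
        pv_equal_congr _ _ _ _ hOk (pv_vsi_keys skupine)
      rw [← heq]
      by_cases h : PySem.Set.equal okA (pvVsiA skupine)
      · -- coverage reached: both return
        have hstne : st ≠ 0 := by
          intro hz
          exact h0 hz (fun y => (hOk y).symm.trans
            ((PySem.Set.equal_iff okA (pvVsiA skupine)).mp h y |>.trans (pv_vsi_keys skupine y)))
        rw [if_pos h, if_pos h, if_pos (by omega : c ≠ 0), if_pos hstne]
        congr 1
        omega
      · rw [if_neg h, if_neg h]
        have hnovi : ∀ y : Int, y ∈ pvNoviB (pvClani skupine) okB ↔ y ∈ temp := by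
          intro y
          rw [pv_mem_noviB, hTemp, pv_new_congr skupine okA okB hOk]
        by_cases hemp : (pvNoviB (pvClani skupine) okB).isEmpty
        · -- the round adds nobody: B stops, A runs into its cap
          rw [if_pos hemp]
          have hnil : pvNoviB (pvClani skupine) okB = [] := by
            simpa [List.isEmpty_iff] using hemp
          have hAne : ¬ (∀ y : Int, y ∈ okA ↔ y ∈ pvVsiA skupine) := by
            rw [← PySem.Set.equal_iff]; exact h
          have hok' : ∀ y : Int, y ∈ PySem.Set.union okA temp ↔ y ∈ okA := by
            intro y
            rw [PySem.Set.mem_union]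
            refine ⟨fun hy => hy.elim id (fun hy2 => ?_), Or.inl⟩
            exfalso
            have : y ∈ pvNoviB (pvClani skupine) okB := (hnovi y).mpr hy2
            rw [hnil] at this
            simp at this
          have hnoNew : ∀ y : Int, ¬ pvNew skupine okA y := by
            intro y hy
            have hmem : y ∈ pvNoviB (pvClani skupine) okB := (hnovi y).mpr ((hTemp y).mpr hy)
            rw [hnil] at hmem
            simp at hmem
          split
          · rfl
          · exact pv_stallA skupine (pvVsiA skupine) _ _ _ _
              (fun hcl => hAne (fun y => (hok' y).symm.trans (hcl y)))
              (fun y hy => hnoNew y ((pv_new_congr skupine _ okA hok' y).mp hy))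
              (fun y hy => by
                rw [pv_mem_tempA] at hy
                exact absurd ((pv_new_congr skupine _ okA hok' y).mp hy) (hnoNew y))
        · rw [if_neg hemp]
          rw [if_neg (by omega : ¬ (c + 1 > 10000)), if_neg (by omega : ¬ (st + 1 > 9999))]
          refine ih (PySem.Set.union okA temp)
            (pvTempA skupine (PySem.Set.union okA temp))
            (PySem.Set.update okB (pvNoviB (pvClani skupine) okB))
            (c+1) (st+1) (by omega) (by omega) (by omega)
            ?_ (fun y => pv_mem_tempA skupine _ y) (by omega)
          intro y
          rw [PySem.Set.mem_union, PySem.Set.mem_update, hOk, hnovi]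

-- ===== VERDICT (by name: the statement is the Claim_ definition above) =====
theorem korakov_do_vseh_spec : Claim_equal_korakov_do_vseh := by
  intro skupine prvi _
  unfold Spec_korakov_do_vseh korakov_do_vseh korakov_do_vseh_alt
  show pvLoopA skupine (pvVsiA skupine) 10001 (PySem.Set.add PySem.Set.empty prvi) PySem.Set.empty 0
      = pvLoopB (pvClani skupine) (PySem.Dict.keys (pvClani skupine)) 10001
          (PySem.Set.add PySem.Set.empty prvi) 0
  have heq : PySem.Set.equal (PySem.Set.add PySem.Set.empty prvi) (pvVsiA skupine) =
      PySem.Set.equal (PySem.Set.add PySem.Set.empty prvi) (PySem.Dict.keys (pvClani skupine)) :=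
    pv_equal_congr _ _ _ _ (fun y => Iff.rfl) (pv_vsi_keys skupine)
  rw [show (10001:Nat) = 10000+1 from rfl, pvLoopA_succ]
  by_cases h : PySem.Set.equal (PySem.Set.add PySem.Set.empty prvi) (pvVsiA skupine)
  · rw [if_pos h, if_neg (by simp : ¬ ((0:Int) ≠ 0)), pvLoopB_succ, ← heq, if_pos h,
      if_neg (by simp : ¬ ((0:Int) ≠ 0))]
  · rw [if_neg h, if_neg (by norm_num : ¬ ((0:Int) + 1 > 10000))]
    refine pv_bisim skupine 9999
      (PySem.Set.union (PySem.Set.add PySem.Set.empty prvi) PySem.Set.empty)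
      (pvTempA skupine (PySem.Set.union (PySem.Set.add PySem.Set.empty prvi) PySem.Set.empty))
      (PySem.Set.add PySem.Set.empty prvi) (0+1) 0 (by norm_num) rfl (by norm_num)
      ?_ (fun y => pv_mem_tempA skupine _ y) ?_
    · intro y
      rw [PySem.Set.mem_union]
      simp [PySem.Set.empty]
    · intro _ hcl
      exact absurd ((PySem.Set.equal_iff _ _).mpr
        (fun y => (hcl y).trans (pv_vsi_keys skupine y).symm)) h
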